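-- pv_equiv track=rewrite | github.com/SillySerpent/Repograph | repograph/pipeline/phases/p05c_http_calls.py | _extract_string_literal
-- ===== SOURCE A (Python) =====
-- def _extract_string_literal(expr: str) -> str:
--     expr = (expr or "").strip()
--     if not expr:
--         return ""
--
--     prefixes = ("rf", "fr", "rb", "br", "ur", "ru", "r", "f", "u", "b")
--     lowered = expr.lower()
--     for prefix in prefixes:
--         if lowered.startswith(prefix) and len(expr) > len(prefix):
--             expr = expr[len(prefix):]
--             break
--
--     for quote in ('"""', "'''", '"', "'"):
--         if expr.startswith(quote) and expr.endswith(quote) and len(expr) >= len(quote) * 2: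
--             return expr[len(quote):-len(quote)]
--     return ""
-- ===== SOURCE B (Python) =====
-- def _extract_string_literal(expr: str) -> str:
--     s = (expr or "").strip()
--     # locate the first quote character; everything before it must be a valid prefix
--     i = 0
--     while i < len(s) and s[i] not in "\"'":
--         i += 1
--     if i == len(s):
--         return ""
--     if i and s[:i].lower() not in {"rf", "fr", "rb", "br", "ur", "ru", "r", "f", "u", "b"}:
--         return ""
--     t = s[i:]
--     q = t[0]
--     for k in (3, 1):
--         if len(t) >= 2 * k and t[:k] == q * k and t[-k:] == q * k:
--             return t[k:-k]
--     return ""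
-- ===== Notes on version B (the rewrite author's own statement) =====
-- stated objective: alternative
-- what changed: A tries each of 10 candidate prefixes and 4 candidate quote strings with startswith/endswith scan-and-break loops; B instead locates the first quote character, validates everything before it with a single set lookup, and peels symmetric delimiters of width 3 then 1 against that one quote character.
import Mathlib
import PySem

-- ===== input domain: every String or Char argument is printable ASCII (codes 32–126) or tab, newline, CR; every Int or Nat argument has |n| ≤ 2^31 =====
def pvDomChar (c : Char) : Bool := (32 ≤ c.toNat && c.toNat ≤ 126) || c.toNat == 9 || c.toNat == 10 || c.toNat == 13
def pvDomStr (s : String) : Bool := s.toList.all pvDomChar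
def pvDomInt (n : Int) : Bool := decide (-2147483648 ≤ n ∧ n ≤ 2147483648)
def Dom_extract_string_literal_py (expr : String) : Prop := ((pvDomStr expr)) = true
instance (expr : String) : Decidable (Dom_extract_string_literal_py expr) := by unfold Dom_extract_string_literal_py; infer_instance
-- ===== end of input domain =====

-- B locates the first quote character, validates everything before it as one prefix-set
-- lookup, and peels symmetric delimiters of width 3 then 1 — instead of A's two
-- try-each-candidate scan loops (objective: alternative, same cost).

-- ===== PORT A =====
-- the tuple of quotes, in A's order
def pvQuotesA : List (List Char) := [['"','"','"'],['\'','\'','\''],['"'],['\'']]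

-- 'for prefix in prefixes: if …: expr = expr[len(prefix):]; break'
def pvAprefixLoop : List (List Char) → List Char → List Char → List Char
  | [], e, _ => e
  | p :: ps, e, lowered =>
    if PySem.Chars.startswith lowered p && decide (e.length > p.length)
    then PySem.List.slice e (some (p.length : Int)) none
    else pvAprefixLoop ps e lowered

-- 'for quote in (…): if …: return expr[len(quote):-len(quote)]' / final 'return ""'
def pvAquoteLoop : List (List Char) → List Char → List Char
  | [], _ => []
  | q :: qs, e =>
    if PySem.Chars.startswith e q && PySem.Chars.endswith e q && decide (e.length ≥ q.length * 2)
    then PySem.List.slice e (some (q.length : Int)) (some (-(q.length : Int)))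
    else pvAquoteLoop qs e

def extract_string_literal_py (expr : String) : String :=
  let e := PySem.Chars.strip expr.toList
  if e = [] then ""
  else
    let lowered := PySem.Chars.lower e
    let e2 := pvAprefixLoop [['r','f'],['f','r'],['r','b'],['b','r'],['u','r'],['r','u'],['r'],['f'],['u'],['b']] e lowered
    String.ofList (pvAquoteLoop pvQuotesA e2)

-- ===== PORT B =====
-- 'while i < len(s) and s[i] not in "\"'": i += 1'
def pvFirstQuoteIdx : List Char → Nat
  | [] => 0
  | c :: t => if c = '"' ∨ c = '\'' then 0 else pvFirstQuoteIdx t + 1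

-- the prefix set {"rf", "fr", …}
def pvPrefixSet : List (List Char) := [['r','f'],['f','r'],['r','b'],['b','r'],['u','r'],['r','u'],['r'],['f'],['u'],['b']]

-- 'for k in (3, 1): if len(t) >= 2*k and t[:k] == q*k and t[-k:] == q*k: return t[k:-k]'
def pvKLoop : List Nat → List Char → Char → List Char
  | [], _, _ => []
  | k :: ks, t, q =>
    if decide (t.length ≥ 2 * k) && (PySem.List.slice t none (some (k : Int)) == List.replicate k q)
        && (PySem.List.slice t (some (-(k : Int))) none == List.replicate k q)
    then PySem.List.slice t (some (k : Int)) (some (-(k : Int)))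
    else pvKLoop ks t q

-- Source B's body after the strip
def pvBcore (s : List Char) : List Char :=
  let i := pvFirstQuoteIdx s
  if i = s.length then []
  else if i ≠ 0 ∧ PySem.Chars.lower (PySem.List.slice s none (some (i : Int))) ∉ pvPrefixSet then []
  else
    match PySem.List.slice s (some (i : Int)) none with
    | [] => []                    -- unreachable: i < len(s)
    | q :: r => pvKLoop [3, 1] (q :: r) q

def extract_string_literal_py_alt (expr : String) : String :=
  String.ofList (pvBcore (PySem.Chars.strip expr.toList))

-- ===== PRECONDITION & SPEC =====
def Spec_extract_string_literal_py (expr : String) (out : String) : Prop := out = extract_string_literal_py_alt expr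
instance (expr : String) (out : String) : Decidable (Spec_extract_string_literal_py expr out) := by unfold Spec_extract_string_literal_py; infer_instance

-- ===== CLAIM (what is proved, stated in full; the proofs are below) =====
def Claim_equal_extract_string_literal_py : Prop := ∀ (expr : String), Dom_extract_string_literal_py expr → Spec_extract_string_literal_py expr (extract_string_literal_py expr)

-- ===== LEMMAS AND PROOFS =====

def pvLetters : List Char := ['r','f','u','b']

-- characterization of A's prefix loop as a classification of the first two characters
def pvPfx (s : List Char) : List Char :=
  match s with
  | c0 :: c1 :: _ :: _ =>
    let a := PySem.Chars.lowerChar c0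
    let b := PySem.Chars.lowerChar c1
    if a ∈ pvLetters ∧ b ∈ pvLetters ∧ a ≠ b ∧ ('r' = a ∨ 'r' = b) then s.drop 2
    else if a ∈ pvLetters then s.drop 1
    else s
  | c0 :: _ :: _ =>
    if PySem.Chars.lowerChar c0 ∈ pvLetters then s.drop 1 else s
  | _ => s

lemma pv_sw (l p : List Char) : PySem.Chars.startswith l p = decide (p <+: l) := by
  by_cases h : p <+: l
  · simp [h, (PySem.Chars.startswith_iff l p).mpr h]
  · simp only [h, decide_false]
    by_contra hb
    exact h ((PySem.Chars.startswith_iff l p).mp (by revert hb; cases PySem.Chars.startswith l p <;> simp))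

lemma pv_ew (l p : List Char) : PySem.Chars.endswith l p = decide (p <:+ l) := by
  by_cases h : p <:+ l
  · simp [h, (PySem.Chars.endswith_iff l p).mpr h]
  · simp only [h, decide_false]
    by_contra hb
    exact h ((PySem.Chars.endswith_iff l p).mp (by revert hb; cases PySem.Chars.endswith l p <;> simp))

lemma pv_tree2 {α : Type} (a : Char) (y z : α) :
    (if 'r' = a then y else if 'f' = a then y else if 'u' = a then y else if 'b' = a then y else z)
    = if a ∈ pvLetters then y else z := by
  by_cases h1 : a = 'r' <;> by_cases h2 : a = 'f' <;> by_cases h3 : a = 'u' <;> by_cases h4 : a = 'b' <;>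
    simp_all [pvLetters, eq_comm]

set_option maxHeartbeats 1000000 in
lemma pv_tree {α : Type} (a b : Char) (x y z : α) :
    (if 'r' = a ∧ 'f' = b then x else if 'f' = a ∧ 'r' = b then x else if 'r' = a ∧ 'b' = b then x
     else if 'b' = a ∧ 'r' = b then x else if 'u' = a ∧ 'r' = b then x else if 'r' = a ∧ 'u' = b then x
     else if 'r' = a then y else if 'f' = a then y else if 'u' = a then y else if 'b' = a then y else z)
    = if a ∈ pvLetters ∧ b ∈ pvLetters ∧ a ≠ b ∧ ('r' = a ∨ 'r' = b) then x else if a ∈ pvLetters then y else z := by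
  by_cases h1 : a = 'r' <;> by_cases h2 : a = 'f' <;> by_cases h3 : a = 'u' <;> by_cases h4 : a = 'b' <;>
  by_cases g1 : b = 'r' <;> by_cases g2 : b = 'f' <;> by_cases g3 : b = 'u' <;> by_cases g4 : b = 'b' <;>
    simp_all [pvLetters, eq_comm]

lemma pv_prefix_eq (l : List Char) :
    pvAprefixLoop [['r','f'],['f','r'],['r','b'],['b','r'],['u','r'],['r','u'],['r'],['f'],['u'],['b']] l (PySem.Chars.lower l) = pvPfx l := by
  have hlow : PySem.Chars.lower l = l.map PySem.Chars.lowerChar := rfl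
  match l with
  | [] => rfl
  | [c0] =>
    simp [pvAprefixLoop, pvPfx, pv_sw, hlow, List.cons_prefix_cons]
  | c0 :: c1 :: t =>
    simp only [pvAprefixLoop, pv_sw, hlow, List.map_cons, List.cons_prefix_cons,
      List.nil_prefix, and_true, List.length_cons, PySem.List.slice_from_natCast]
    cases t with
    | nil =>
      norm_num
      exact pv_tree2 _ _ _
    | cons c2 t =>
      have h3 : (2 : Nat) < t.length + 1 + 1 + 1 := by omega
      have h1 : (1 : Nat) < t.length + 1 + 1 + 1 := by omega
      norm_num [h3, h1]
      exact pv_tree _ _ _ _ _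

-- A's quote scan equals B's (3,1)-peeling loop when the head is a quote
set_option maxHeartbeats 4000000 in
set_option maxRecDepth 4000 in
lemma pv_quote_core (q : Char) (t : List Char) (hq : q = '"' ∨ q = '\'') :
    pvAquoteLoop pvQuotesA (q :: t) = pvKLoop [3, 1] (q :: t) q := by
  have hsl3 : PySem.List.slice (q :: t) none (some 3) = List.take 3 (q :: t) := by simp [pysem]
  have hsl3' : PySem.List.slice (q :: t) (some (-3)) none = List.drop ((q :: t).length - 3) (q :: t) := by
    simp [pysem]
  have hsl1 : PySem.List.slice (q :: t) none (some 1) = List.take 1 (q :: t) := by simp [pysem]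
  have hsl1' : PySem.List.slice (q :: t) (some (-1)) none = List.drop ((q :: t).length - 1) (q :: t) := by
    simp [pysem]
  have hrep3 : List.replicate 3 q = [q, q, q] := rfl
  have hrep1 : List.replicate 1 q = [q] := rfl
  simp only [pvAquoteLoop, pvQuotesA, pvKLoop, pv_sw, pv_ew, Nat.cast_ofNat, Nat.cast_one,
    hsl3, hsl3', hsl1, hsl1', hrep3, hrep1]
  simp only [List.prefix_iff_eq_take, List.suffix_iff_eq_drop]
  simp only [List.length_cons, List.length_nil, ge_iff_le, List.take_succ_cons, List.take_zero]
  norm_num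
  simp only [@eq_comm (List Char) _ _]
  obtain hq' | hq' := hq <;> subst hq' <;>
  [ (by_cases h1 : List.take 2 t = ['\"','\"'] <;>
     by_cases h2 : List.drop (t.length + 1 - 3) ('\"' :: t) = ['\"','\"','\"'] <;>
     by_cases h3 : List.drop t.length ('\"' :: t) = ['\"'] <;>
     by_cases h6 : 6 ≤ t.length + 1 <;>
     by_cases hb2 : 2 ≤ t.length + 1 <;>
     (simp_all <;> (split_ifs <;> tauto)));
    (by_cases h1 : List.take 2 t = ['\'','\''] <;>
     by_cases h2 : List.drop (t.length + 1 - 3) ('\'' :: t) = ['\'','\'','\''] <;>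
     by_cases h3 : List.drop t.length ('\'' :: t) = ['\''] <;>
     by_cases h6 : 6 ≤ t.length + 1 <;>
     by_cases hb2 : 2 ≤ t.length + 1 <;>
     (simp_all <;> (split_ifs <;> tauto)))]

lemma pv_quote_nonquote (c : Char) (t : List Char) (h1 : ¬ c = '"') (h2 : ¬ c = '\'') :
    pvAquoteLoop pvQuotesA (c :: t) = [] := by
  simp [pvAquoteLoop, pvQuotesA, pv_sw, pv_ew, List.cons_prefix_cons, Ne.symm h1, Ne.symm h2]

lemma pv_pfx_nonletter (c0 : Char) (t0 : List Char) (h : PySem.Chars.lowerChar c0 ∉ pvLetters) :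
    pvPfx (c0 :: t0) = c0 :: t0 := by
  match t0 with
  | [] => rfl
  | [c1] => simp [pvPfx, h]
  | c1 :: c2 :: t => simp [pvPfx, h]

lemma pv_mem1 (a : Char) : (([a] : List Char) ∈ pvPrefixSet) ↔ a ∈ pvLetters := by
  simp [pvPrefixSet, pvLetters]

set_option maxHeartbeats 1000000 in
lemma pv_mem2 (a b : Char) :
    (([a, b] : List Char) ∈ pvPrefixSet)
      ↔ (a ∈ pvLetters ∧ b ∈ pvLetters ∧ a ≠ b ∧ ('r' = a ∨ 'r' = b)) := by
  by_cases h1 : a = 'r' <;> by_cases h2 : a = 'f' <;> by_cases h3 : a = 'u' <;> by_cases h4 : a = 'b' <;>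
  by_cases g1 : b = 'r' <;> by_cases g2 : b = 'f' <;> by_cases g3 : b = 'u' <;> by_cases g4 : b = 'b' <;>
    simp_all [pvPrefixSet, pvLetters, eq_comm]

lemma pv_memlen (l : List Char) (h : l ∈ pvPrefixSet) : l.length ≤ 2 := by
  fin_cases h <;> simp

lemma pv_lower_quote (c : Char) (h : c = '"' ∨ c = '\'') :
    PySem.Chars.lowerChar c ∉ pvLetters := by
  obtain h | h := h <;> subst h <;> decide

lemma pv_fqi_le (s : List Char) : pvFirstQuoteIdx s ≤ s.length := by
  induction s with
  | nil => simp [pvFirstQuoteIdx]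
  | cons c t ih =>
    simp only [pvFirstQuoteIdx, List.length_cons]
    split <;> omega

-- main list-level lemma: A's pipeline after the strip equals B's core
lemma pv_main (s : List Char) :
    pvAquoteLoop pvQuotesA (pvPfx s) = pvBcore s := by
  have hlow : ∀ (l : List Char), PySem.Chars.lower l = l.map PySem.Chars.lowerChar := fun _ => rfl
  match s with
  | [] => rfl
  | c0 :: t0 =>
    by_cases hq0 : c0 = '"' ∨ c0 = '\''
    · -- i = 0: A strips no prefix, both run the quote step on s
      have hfqi : pvFirstQuoteIdx (c0 :: t0) = 0 := by simp [pvFirstQuoteIdx, hq0]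
      rw [pv_pfx_nonletter _ _ (pv_lower_quote _ hq0), pv_quote_core _ _ hq0]
      simp [pvBcore, hfqi]
    · have hq0' := hq0
      push_neg at hq0'
      obtain ⟨hq0a, hq0b⟩ := hq0'
      match t0 with
      | [] =>
        rw [show pvPfx [c0] = [c0] from rfl, pv_quote_nonquote _ _ hq0a hq0b]
        simp [pvBcore, pvFirstQuoteIdx, hq0]
      | c1 :: t1 =>
        by_cases hq1 : c1 = '"' ∨ c1 = '\''
        · -- i = 1: prefix is the single letter s[0]
          have hfqi1 : pvFirstQuoteIdx (c0 :: c1 :: t1) = 1 := by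
            simp [pvFirstQuoteIdx, hq0, hq1]
          have hb : PySem.Chars.lowerChar c1 ∉ pvLetters := pv_lower_quote _ hq1
          by_cases ha : PySem.Chars.lowerChar c0 ∈ pvLetters
          · have hA : pvPfx (c0 :: c1 :: t1) = c1 :: t1 := by
              match t1 with
              | [] => simp [pvPfx, ha]
              | c2 :: t2 => simp [pvPfx, ha, hb]
            rw [hA, pv_quote_core _ _ hq1]
            simp only [pvBcore, hfqi1]
            rw [PySem.List.slice_to_natCast, PySem.List.slice_from_natCast]
            simp [hlow, pv_mem1, ha]
          · rw [pv_pfx_nonletter _ _ ha, pv_quote_nonquote _ _ hq0a hq0b]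
            simp only [pvBcore, hfqi1]
            rw [PySem.List.slice_to_natCast, PySem.List.slice_from_natCast]
            simp [hlow, pv_mem1, ha]
        · have hq1' := hq1
          push_neg at hq1'
          obtain ⟨hq1a, hq1b⟩ := hq1'
          match t1 with
          | [] =>
            -- i = 2 = len(s): B returns "", A's stripped string starts with a non-quote
            have hA : pvAquoteLoop pvQuotesA (pvPfx [c0, c1]) = [] := by
              by_cases ha : PySem.Chars.lowerChar c0 ∈ pvLetters
              · rw [show pvPfx [c0, c1] = [c1] by simp [pvPfx, ha]]
                exact pv_quote_nonquote _ _ hq1a hq1b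
              · rw [pv_pfx_nonletter _ _ ha]
                exact pv_quote_nonquote _ _ hq0a hq0b
            rw [hA]
            simp [pvBcore, pvFirstQuoteIdx, hq0, hq1]
          | c2 :: t2 =>
            by_cases hq2 : c2 = '"' ∨ c2 = '\''
            · -- i = 2: prefix is the two letters s[:2]
              have hfqi2 : pvFirstQuoteIdx (c0 :: c1 :: c2 :: t2) = 2 := by
                simp [pvFirstQuoteIdx, hq0, hq1, hq2]
              by_cases htc : PySem.Chars.lowerChar c0 ∈ pvLetters ∧
                  PySem.Chars.lowerChar c1 ∈ pvLetters ∧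
                  PySem.Chars.lowerChar c0 ≠ PySem.Chars.lowerChar c1 ∧
                  ('r' = PySem.Chars.lowerChar c0 ∨ 'r' = PySem.Chars.lowerChar c1)
              · rw [show pvPfx (c0 :: c1 :: c2 :: t2) = c2 :: t2 by simp [pvPfx, htc],
                    pv_quote_core _ _ hq2]
                simp only [pvBcore, hfqi2]
                rw [PySem.List.slice_to_natCast, PySem.List.slice_from_natCast]
                simp [hlow, pv_mem2, htc]
              · have hA : pvAquoteLoop pvQuotesA (pvPfx (c0 :: c1 :: c2 :: t2)) = [] := by
                  by_cases ha : PySem.Chars.lowerChar c0 ∈ pvLetters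
                  · rw [show pvPfx (c0 :: c1 :: c2 :: t2) = c1 :: c2 :: t2 by
                        simp only [pvPfx]; rw [if_neg htc, if_pos ha]; rfl]
                    exact pv_quote_nonquote _ _ hq1a hq1b
                  · rw [pv_pfx_nonletter _ _ ha]
                    exact pv_quote_nonquote _ _ hq0a hq0b
                rw [hA]
                simp only [pvBcore, hfqi2]
                rw [PySem.List.slice_to_natCast, PySem.List.slice_from_natCast]
                simp [hlow, pv_mem2, htc]
            · -- i ≥ 3: B rejects the over-long prefix (or finds no quote); A's string
              -- still starts with a non-quote character after any strip
              have hq2' := hq2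
              push_neg at hq2'
              obtain ⟨hq2a, hq2b⟩ := hq2'
              have hA : pvAquoteLoop pvQuotesA (pvPfx (c0 :: c1 :: c2 :: t2)) = [] := by
                by_cases htc : PySem.Chars.lowerChar c0 ∈ pvLetters ∧
                    PySem.Chars.lowerChar c1 ∈ pvLetters ∧
                    PySem.Chars.lowerChar c0 ≠ PySem.Chars.lowerChar c1 ∧
                    ('r' = PySem.Chars.lowerChar c0 ∨ 'r' = PySem.Chars.lowerChar c1)
                · rw [show pvPfx (c0 :: c1 :: c2 :: t2) = c2 :: t2 by simp [pvPfx, htc]]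
                  exact pv_quote_nonquote _ _ hq2a hq2b
                · by_cases ha : PySem.Chars.lowerChar c0 ∈ pvLetters
                  · rw [show pvPfx (c0 :: c1 :: c2 :: t2) = c1 :: c2 :: t2 by
                        simp only [pvPfx]; rw [if_neg htc, if_pos ha]; rfl]
                    exact pv_quote_nonquote _ _ hq1a hq1b
                  · rw [pv_pfx_nonletter _ _ ha]
                    exact pv_quote_nonquote _ _ hq0a hq0b
              rw [hA]
              have hfqi3 : pvFirstQuoteIdx (c0 :: c1 :: c2 :: t2)
                  = pvFirstQuoteIdx t2 + 3 := by
                simp [pvFirstQuoteIdx, hq0, hq1, hq2]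
              unfold pvBcore
              rw [hfqi3]
              by_cases hlen : pvFirstQuoteIdx t2 + 3 = (c0 :: c1 :: c2 :: t2).length
              · simp [hlen]
              · -- prefix of length ≥ 3 is never in the set
                have hle : pvFirstQuoteIdx t2 ≤ t2.length := pv_fqi_le t2
                have hlen' : ¬ pvFirstQuoteIdx t2 = t2.length := by
                  intro h; apply hlen; simp [h]
                have hnotmem : PySem.Chars.lower (PySem.List.slice (c0 :: c1 :: c2 :: t2)
                    none (some ((pvFirstQuoteIdx t2 : Int) + 3))) ∉ pvPrefixSet := by
                  intro hmem
                  have h2 := pv_memlen _ hmem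
                  rw [hlow, show ((pvFirstQuoteIdx t2 : Int) + 3)
                        = ((pvFirstQuoteIdx t2 + 3 : Nat) : Int) by push_cast; ring,
                      PySem.List.slice_to_natCast] at h2
                  simp only [List.length_map, List.length_take, List.length_cons] at h2
                  omega
                simp [hlen', hnotmem]

-- ===== VERDICT (by name: the statement is the Claim_ definition above) =====
theorem extract_string_literal_py_spec : Claim_equal_extract_string_literal_py := by
  intro expr _
  unfold Spec_extract_string_literal_py extract_string_literal_py extract_string_literal_py_alt
  simp only [pv_prefix_eq, pv_main]
  split
  · next h => simp [h, pvBcore, pvFirstQuoteIdx]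
  · rfl
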